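-- pv_equiv track=rewrite | github.com/dhp85/CONNECTA | list_utils.py | find_streak
-- ===== SOURCE A (Python) =====
-- def find_streak(list, needle, nstrike):
--     """
--     Devuelve True si en lista hay n o mas needles seguidos False, para todos los demas.
--     """
--     # si n >= 0.
--     if nstrike >= 0:
--     # inicializo el indice el contador y el indicador de racha.
--         indice = 0
--         count_strike = 0
--     # mientras no haya encontrado n seguidos y la lista no se haya acabado.
--         while count_strike < nstrike and indice < len(list):
--     # si lo encuentro, activo el indicador de rachas y actualizo el contador.
--             if needle == list[indice]:
--                 count_strike += 1
--     # si no lo encuentro, desactivo indicador de racha y pongo a cero el contador.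
--             else:
--                 count_strike = 0
--     # avanzo al siguiente elemento.
--             indice += 1
--     # devolvemos el resultado de comparar el contador con n SIEMPRE Y CUANDO estemos en racha.
--         return count_strike == nstrike
--     else:
--         return False
-- ===== SOURCE B (Python) =====
-- def find_streak(list, needle, nstrike):
--     """True iff the list contains nstrike or more consecutive needles."""
--     if nstrike < 0:
--         return False
--     if nstrike == 0:
--         return True
--     i, n = 0, len(list)
--     while i < n:
--         # j scans to the end of the maximal run starting at i.
--         j = i
--         while j < n and list[j] == list[i]:
--             j += 1
--         if list[i] == needle and j - i >= nstrike:
--             return True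
--         i = j
--     return False
-- ===== Notes on version B (the rewrite author's own statement) =====
-- stated objective: alternative
-- what changed: Replaces the counter-reset element-by-element scan with a partition of the list into maximal runs of equal elements, testing each run's key and length (early return), with explicit guards for nstrike<0 (False) and nstrike==0 (True).
import Mathlib
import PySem

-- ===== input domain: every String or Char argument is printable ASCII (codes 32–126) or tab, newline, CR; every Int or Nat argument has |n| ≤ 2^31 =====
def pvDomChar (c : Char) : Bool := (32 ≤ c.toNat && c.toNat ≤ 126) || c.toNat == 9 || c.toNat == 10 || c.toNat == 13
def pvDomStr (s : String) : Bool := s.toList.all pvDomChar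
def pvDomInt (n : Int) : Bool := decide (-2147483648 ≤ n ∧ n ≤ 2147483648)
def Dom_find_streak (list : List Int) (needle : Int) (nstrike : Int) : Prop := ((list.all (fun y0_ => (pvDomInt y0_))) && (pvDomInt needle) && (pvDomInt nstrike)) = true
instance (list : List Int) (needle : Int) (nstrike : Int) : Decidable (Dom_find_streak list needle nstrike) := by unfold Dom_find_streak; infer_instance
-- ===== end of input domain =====

-- B replaces A's counter-reset scan by a partition into maximal runs of equal
-- elements, testing each run's key and length (alternative decomposition, same cost).


-- ===== PORT A =====
-- A's while loop: counter resets on mismatch, stops once count_strike reaches nstrike;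
-- returns count_strike == nstrike when it stops.
def fsLoop (needle nstrike : Int) : List Int → Int → Bool
  | [], count => count == nstrike
  | x :: t, count =>
    if count < nstrike then fsLoop needle nstrike t (if needle == x then count + 1 else 0)
    else count == nstrike

def find_streak (list : List Int) (needle : Int) (nstrike : Int) : Bool :=
  if nstrike ≥ 0 then fsLoop needle nstrike list 0 else false

-- ===== PORT B =====
-- B's outer while: the maximal run starting at the head is takeWhile/dropWhile (the
-- inner j-scan); test its key and length, else continue after the run.
def fsRuns (needle nstrike : Int) : List Int → Bool
  | [] => false
  | x :: xs =>
      if x == needle && decide (nstrike ≤ (xs.takeWhile (· == x)).length + 1) then true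
      else fsRuns needle nstrike (xs.dropWhile (· == x))
  termination_by xs => xs.length
  decreasing_by
    simp only [List.length_cons]
    exact Nat.lt_succ_of_le (List.length_dropWhile_le _ _)

def find_streak_alt (list : List Int) (needle : Int) (nstrike : Int) : Bool :=
  if nstrike < 0 then false
  else if nstrike == 0 then true
  else fsRuns needle nstrike list

-- ===== PRECONDITION & SPEC =====
def Spec_find_streak (list : List Int) (needle : Int) (nstrike : Int) (out : Bool) : Prop := out = find_streak_alt list needle nstrike
instance (list : List Int) (needle : Int) (nstrike : Int) (out : Bool) : Decidable (Spec_find_streak list needle nstrike out) := by unfold Spec_find_streak; infer_instance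

-- ===== CLAIM (what is proved, stated in full; the proofs are below) =====
def Claim_equal_find_streak : Prop := ∀ (list : List Int) (needle : Int) (nstrike : Int), Dom_find_streak list needle nstrike → Spec_find_streak list needle nstrike (find_streak list needle nstrike)

-- ===== LEMMAS AND PROOFS =====

-- length of the leading run of needles
def pref (needle : Int) (xs : List Int) : Nat := (xs.takeWhile (· == needle)).length

-- maximal number of consecutive needles anywhere in the list
def mx (needle : Int) : List Int → Nat
  | [] => 0
  | x :: xs => max (pref needle (x :: xs)) (mx needle xs)

theorem pref_le_mx (needle : Int) (xs : List Int) : pref needle xs ≤ mx needle xs := by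
  cases xs with
  | nil => simp [pref, mx]
  | cons x t => exact le_max_left _ _

theorem pref_cons_pos (needle : Int) (t : List Int) :
    pref needle (needle :: t) = 1 + pref needle t := by
  simp [pref, Nat.add_comm]

theorem pref_cons_neg {needle x : Int} (h : x ≠ needle) (t : List Int) :
    pref needle (x :: t) = 0 := by
  simp [pref, h]

-- once the counter has reached nstrike the loop immediately reports success
theorem fsLoop_stop (needle nstrike : Int) (xs : List Int) (c : Int) (h : c = nstrike) :
    fsLoop needle nstrike xs c = true := by
  cases xs with
  | nil => simp [fsLoop, h]
  | cons x t =>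
      simp [fsLoop, h]

-- A's loop computes: the streak completes either from the current counter plus the
-- leading run, or from some later run.
theorem fsLoop_char (needle nstrike : Int) (hn : 1 ≤ nstrike) :
    ∀ (xs : List Int) (c : Int), 0 ≤ c → c < nstrike →
      fsLoop needle nstrike xs c =
        decide (nstrike ≤ c + (pref needle xs : Int) ∨ nstrike ≤ (mx needle xs : Int)) := by
  intro xs
  induction xs with
  | nil =>
      intro c hc hlt
      simp only [fsLoop, pref, mx, List.takeWhile_nil, List.length_nil, Nat.cast_zero, add_zero]
      have h1 : (c == nstrike) = false := beq_eq_false_iff_ne.mpr (by omega)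
      rw [h1, decide_eq_false (by rintro (h | h) <;> omega)]
  | cons x t ih =>
      intro c hc hlt
      rw [fsLoop, if_pos hlt]
      by_cases hx : (needle == x) = true
      · have hxe : x = needle := (beq_iff_eq.mp hx).symm
        subst hxe
        rw [if_pos hx, pref_cons_pos]
        by_cases h1 : c + 1 < nstrike
        · rw [ih (c + 1) (by omega) h1]
          simp only [mx, pref_cons_pos]
          have hle : pref x t ≤ mx x t := pref_le_mx x t
          simp only [decide_eq_decide]
          push_cast
          omega
        · have hce : c + 1 = nstrike := by omega
          rw [fsLoop_stop x nstrike t (c + 1) hce]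
          symm
          simp only [decide_eq_true_eq]
          left
          push_cast
          omega
      · have hxe : x ≠ needle := fun h => by simp [h] at hx
        rw [if_neg hx, ih 0 le_rfl (by omega)]
        have hle : pref needle t ≤ mx needle t := pref_le_mx needle t
        simp only [mx, pref_cons_neg hxe]
        simp only [decide_eq_decide]
        push_cast
        omega

-- dropping a leading run of non-needles does not change the maximum needle run
theorem mx_dropWhile_neg (needle x : Int) (hx : x ≠ needle) (xs : List Int) :
    mx needle (xs.dropWhile (· == x)) = mx needle xs := by
  induction xs with
  | nil => simp
  | cons y t ih =>
      by_cases hy : (y == x) = true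
      · have hye : y = x := by simpa using hy
        subst hye
        rw [List.dropWhile_cons_of_pos (by simp), ih]
        simp [mx, pref_cons_neg hx]
      · rw [List.dropWhile_cons_of_neg (by simpa using hy)]

-- splitting off the leading run: the maximum is the leading-run length or the
-- maximum of the remainder
theorem mx_split (needle : Int) (xs : List Int) :
    mx needle xs = max (pref needle xs) (mx needle (xs.dropWhile (· == needle))) := by
  induction xs with
  | nil => simp [mx, pref]
  | cons x t ih =>
      by_cases hx : x = needle
      · subst hx
        rw [List.dropWhile_cons_of_pos (by simp)]
        simp only [mx, pref_cons_pos]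
        rw [ih]
        omega
      · rw [List.dropWhile_cons_of_neg (by simpa using hx)]
        simp only [mx, pref_cons_neg hx]
        omega

-- B's run scan tests exactly whether the maximal needle run reaches nstrike
theorem fsRuns_char (needle nstrike : Int) (hn : 1 ≤ nstrike) :
    ∀ (xs : List Int), fsRuns needle nstrike xs = decide (nstrike ≤ (mx needle xs : Int)) := by
  intro xs
  induction hl : xs.length using Nat.strong_induction_on generalizing xs with
  | _ n ih =>
    cases xs with
    | nil => simp [fsRuns, mx]; omega
    | cons x t =>
      rw [fsRuns]
      have hrec : fsRuns needle nstrike (t.dropWhile (· == x)) =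
          decide (nstrike ≤ (mx needle (t.dropWhile (· == x)) : Int)) := by
        subst hl
        exact ih _ (Nat.lt_succ_of_le (List.length_dropWhile_le _ _)) _ rfl
      by_cases hx : x = needle
      · subst hx
        have hpref : pref x (x :: t) = (t.takeWhile (· == x)).length + 1 := by
          simp [pref, Nat.add_comm]
        have hdrop : (x :: t).dropWhile (· == x) = t.dropWhile (· == x) :=
          List.dropWhile_cons_of_pos (by simp)
        rw [mx_split x (x :: t), hdrop, hpref]
        by_cases hbig : nstrike ≤ ((t.takeWhile (· == x)).length : Int) + 1
        · rw [if_pos (by simp [hbig])]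
          symm
          simp only [decide_eq_true_eq]
          push_cast
          omega
        · rw [if_neg (by simp [hbig]), hrec]
          simp only [decide_eq_decide]
          push_cast at hbig ⊢
          omega
      · have h1 : (x == needle) = false := by simpa using hx
        rw [if_neg (by simp [h1]), hrec, mx_dropWhile_neg needle x hx]
        have : mx needle (x :: t) = mx needle t := by simp [mx, pref_cons_neg hx]
        rw [this]

-- ===== VERDICT (by name: the statement is the Claim_ definition above) =====
theorem find_streak_spec : Claim_equal_find_streak := by
  intro list needle nstrike _
  unfold Spec_find_streak find_streak find_streak_alt
  by_cases hneg : nstrike < 0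
  · simp [hneg, not_le.mpr hneg]
  · have h0 : nstrike ≥ 0 := by omega
    rw [if_pos h0, if_neg hneg]
    by_cases hz : nstrike = 0
    · subst hz
      rw [fsLoop_stop needle 0 list 0 rfl]
      simp
    · have h1 : 1 ≤ nstrike := by omega
      rw [if_neg (by simpa using hz)]
      rw [fsLoop_char needle nstrike h1 list 0 le_rfl (by omega)]
      rw [fsRuns_char needle nstrike h1 list]
      have := pref_le_mx needle list
      simp only [decide_eq_decide]
      omega
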